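-- pv_equiv track=rewrite | github.com/keithrozario/advent-of-code | 2024/05/solution.py | check
-- ===== SOURCE A (Python) =====
-- def check(update: list, rules_dict: dict)->bool:
--     """
--     Checks where a given update adheres to all the rules in the rules_dict
--     """
--     for i, num in enumerate(update):
--             numbers_after = set(update[i:])
--             try:
--                 if (numbers_after & rules_dict[num]):
--                     return False
--             except KeyError:
--                 pass # number has no rule associated with it
--     return True
-- ===== SOURCE B (Python) =====
-- def check(update: list, rules_dict: dict) -> bool:
--     """
--     Index the update once (first and last occurrence of each page), then scan
--     the rules: rule key -> members is violated iff the key occurs and some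
--     member's last occurrence is at or after the key's first occurrence.
--     """
--     first = {}
--     for i, n in enumerate(update):
--         first.setdefault(n, i)
--     last = {}
--     for i, n in enumerate(update):
--         last[n] = i
--     for key in rules_dict:
--         if key in first:
--             f = first[key]
--             if any(last.get(m, -1) >= f for m in rules_dict[key]):
--                 return False
--     return True
-- ===== Notes on version B (the rewrite author's own statement) =====
-- stated objective: faster
-- what changed: Instead of rebuilding set(update[i:]) and intersecting it with the rule at every position, B indexes the update once (first- and last-occurrence dicts) and then scans the rules, flagging a violation when a member's last occurrence is at or after the key's first occurrence.
import Mathlib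
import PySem

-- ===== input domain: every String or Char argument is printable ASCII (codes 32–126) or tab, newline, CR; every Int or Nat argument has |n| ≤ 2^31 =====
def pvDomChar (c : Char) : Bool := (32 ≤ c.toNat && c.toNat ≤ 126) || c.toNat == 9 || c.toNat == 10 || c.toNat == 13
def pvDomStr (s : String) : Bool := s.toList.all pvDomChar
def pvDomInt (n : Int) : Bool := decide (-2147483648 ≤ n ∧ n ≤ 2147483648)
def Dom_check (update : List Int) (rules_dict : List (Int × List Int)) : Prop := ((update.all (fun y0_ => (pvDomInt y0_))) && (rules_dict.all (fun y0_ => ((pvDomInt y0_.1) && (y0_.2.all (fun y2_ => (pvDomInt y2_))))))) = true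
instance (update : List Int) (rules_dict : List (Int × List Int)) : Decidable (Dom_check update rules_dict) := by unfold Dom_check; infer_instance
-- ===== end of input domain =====

-- ===== PORT A =====
-- B replaces A's per-position set(update[i:]) rebuild + intersection with two index
-- dicts built once and a single scan over the rules (objective: faster, asymptotic).

-- the 'for i, num in enumerate(update)' loop with its early 'return False'
def checkGo (update : List Int) (rules_dict : List (Int × List Int)) : List (Int × Int) → Bool
  | [] => true
  | (i, num) :: rest =>
    let numbers_after : PySem.Set Int := PySem.Set.ofList (PySem.List.slice update (some i) none)
    match (PySem.Dict.mk rules_dict).get? num with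
    | some rule => if PySem.Set.inter numbers_after rule ≠ [] then false
                   else checkGo update rules_dict rest
    | none => checkGo update rules_dict rest

def check (update : List Int) (rules_dict : List (Int × List Int)) : Bool :=
  checkGo update rules_dict (PySem.List.enumerate update 0)

-- ===== PORT B =====
-- "first = {}; for i, n in enumerate(update): first.setdefault(n, i)"
def firstIdxDict (update : List Int) : PySem.Dict Int Int :=
  (PySem.List.enumerate update 0).foldl
    (fun d p => PySem.Dict.setdefault d p.2 p.1) PySem.Dict.empty

-- "last = {}; for i, n in enumerate(update): last[n] = i"
def lastIdxDict (update : List Int) : PySem.Dict Int Int :=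
  (PySem.List.enumerate update 0).foldl
    (fun d p => PySem.Dict.insert d p.2 p.1) PySem.Dict.empty

-- "for key in rules_dict: …" with its early 'return False'
def checkRulesGo (first last : PySem.Dict Int Int) (rd : PySem.Dict Int (List Int)) :
    List Int → Bool
  | [] => true
  | key :: rest =>
    match first.get? key with
    | some f =>
        if (rd.getD key []).any (fun m => last.getD m (-1) ≥ f) then false
        else checkRulesGo first last rd rest
    | none => checkRulesGo first last rd rest

def check_alt (update : List Int) (rules_dict : List (Int × List Int)) : Bool :=
  let d := PySem.Dict.mk rules_dict
  checkRulesGo (firstIdxDict update) (lastIdxDict update) d d.keys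

-- ===== PRECONDITION & SPEC =====
def Spec_check (update : List Int) (rules_dict : List (Int × List Int)) (out : Bool) : Prop := out = check_alt update rules_dict
instance (update : List Int) (rules_dict : List (Int × List Int)) (out : Bool) : Decidable (Spec_check update rules_dict out) := by unfold Spec_check; infer_instance

-- ===== CLAIM (what is proved, stated in full; the proofs are below) =====
def Claim_equal_check : Prop := ∀ (update : List Int) (rules_dict : List (Int × List Int)), Dom_check update rules_dict → Spec_check update rules_dict (check update rules_dict)

-- ===== LEMMAS AND PROOFS =====

-- the violation condition both programs detect
def Viol (u : List Int) (rd : List (Int × List Int)) : Prop :=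
  ∃ num rule, (PySem.Dict.mk rd).get? num = some rule ∧
    ∃ i : ℕ, ∃ h : i < u.length, u[i] = num ∧ ∃ m ∈ rule, m ∈ u.drop i

-- index (from the back) of the last occurrence
def lastIdx? : List Int → Int → Option ℕ
  | [], _ => none
  | x :: t, k =>
    match lastIdx? t k with
    | some j => some (j + 1)
    | none => if x = k then some 0 else none

theorem lastIdx?_eq_none_iff (u : List Int) (k : Int) :
    lastIdx? u k = none ↔ k ∉ u := by
  induction u with
  | nil => simp [lastIdx?]
  | cons x t ih =>
    unfold lastIdx?
    cases h : lastIdx? t k with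
    | some j =>
      have hk : k ∈ t := by
        by_contra hk
        rw [← ih] at hk
        simp [hk] at h
      simp [hk]
    | none =>
      by_cases hx : x = k
      · simp [hx]
      · simp only [hx, if_false]
        simp [ih.mp h, Ne.symm hx]

theorem mem_drop_iff_lastIdx (u : List Int) (m : Int) (f : ℕ) :
    m ∈ u.drop f ↔ ∃ l, lastIdx? u m = some l ∧ f ≤ l := by
  induction u generalizing f with
  | nil => simp [lastIdx?]
  | cons x t ih =>
    cases f with
    | zero =>
      simp only [List.drop_zero]
      constructor
      · intro hm
        cases h : lastIdx? (x :: t) m with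
        | none => exact absurd hm ((lastIdx?_eq_none_iff _ _).mp h)
        | some l => exact ⟨l, rfl, Nat.zero_le l⟩
      · rintro ⟨l, hl, -⟩
        by_contra hm
        rw [(lastIdx?_eq_none_iff _ _).mpr hm] at hl
        cases hl
    | succ f =>
      rw [List.drop_succ_cons, ih]
      cases h : lastIdx? t m with
      | some j =>
        have hc : lastIdx? (x :: t) m = some (j + 1) := by simp [lastIdx?, h]
        simp [hc]
      | none =>
        by_cases hx : x = m
        · have hc : lastIdx? (x :: t) m = some 0 := by simp [lastIdx?, h, hx]
          simp [hc]
        · have hc : lastIdx? (x :: t) m = none := by simp [lastIdx?, h, hx]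
          simp [hc]

theorem inter_ne_nil_iff (s rule : List Int) :
    PySem.Set.inter (PySem.Set.ofList s) rule ≠ [] ↔ ∃ m ∈ s, m ∈ rule := by
  rw [← List.isEmpty_eq_false_iff, List.isEmpty_eq_false_iff_exists_mem]
  simp [PySem.Set.mem_inter, PySem.Set.mem_ofList]

-- A's loop from position n onward detects exactly the violations at i ≥ n
theorem AGo_char (u : List Int) (rd : List (Int × List Int)) :
    ∀ (t : List Int) (n : ℕ), u.drop n = t →
      (checkGo u rd (PySem.List.enumerate t (n : Int)) = false ↔
        ∃ num rule, (PySem.Dict.mk rd).get? num = some rule ∧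
          ∃ i : ℕ, n ≤ i ∧ ∃ h : i < u.length, u[i] = num ∧ ∃ m ∈ rule, m ∈ u.drop i) := by
  intro t
  induction t with
  | nil =>
    intro n hdrop
    have hlen : u.length ≤ n := by
      by_contra hlt
      have := List.drop_eq_nil_iff.mp hdrop
      omega
    simp only [PySem.List.enumerate_nil, checkGo]
    constructor
    · intro h; cases h
    · rintro ⟨num, rule, -, i, hni, hi, -⟩; omega
  | cons a r ih =>
    intro n hdrop
    have hn : n < u.length := by
      by_contra hge
      rw [List.drop_eq_nil_iff.mpr (by omega)] at hdrop
      cases hdrop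
    have hua : u[n] = a := by
      have h0 : (u.drop n)[0]'(by rw [hdrop]; simp) = a := by
        simp [hdrop]
      rw [List.getElem_drop] at h0
      simpa using h0
    have hdrop' : u.drop (n + 1) = r := by
      have := List.tail_drop (l := u) (i := n)
      rw [hdrop] at this
      simpa using this.symm
    have ihn := ih (n + 1) hdrop'
    have hslice : PySem.List.slice u (some (n : Int)) none = a :: r := by
      rw [PySem.List.slice_from_natCast, hdrop]
    rw [PySem.List.enumerate_cons, show ((n : Int) + 1) = ((n + 1 : ℕ) : Int) by push_cast; ring]
    show (checkGo u rd ((_, a) :: _) = false ↔ _)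
    unfold checkGo
    rw [hslice]
    cases hg : (PySem.Dict.mk rd).get? a with
    | none =>
      rw [ihn]
      constructor
      · rintro ⟨num, rule, hr, i, hni, hi, hnum, hm⟩
        exact ⟨num, rule, hr, i, by omega, hi, hnum, hm⟩
      · rintro ⟨num, rule, hr, i, hni, hi, hnum, hm⟩
        refine ⟨num, rule, hr, i, ?_, hi, hnum, hm⟩
        rcases Nat.eq_or_lt_of_le hni with rfl | h
        · rw [hua] at hnum; rw [← hnum, hg] at hr; cases hr
        · omega
    | some rule =>
      show ((if PySem.Set.inter (PySem.Set.ofList (a :: r)) rule ≠ [] then false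
             else checkGo u rd (PySem.List.enumerate r ((n + 1 : ℕ) : Int))) = false ↔ _)
      by_cases hint : PySem.Set.inter (PySem.Set.ofList (a :: r)) rule ≠ []
      · rw [if_pos hint]
        constructor
        · intro _
          obtain ⟨m, hms, hmr⟩ := (inter_ne_nil_iff _ _).mp hint
          exact ⟨a, rule, hg, n, le_refl n, hn, hua, m, hmr, by rwa [hdrop]⟩
        · intro _; rfl
      · rw [if_neg hint]
        rw [ihn]
        constructor
        · rintro ⟨num, rule', hr, i, hni, hi, hnum, hm⟩
          exact ⟨num, rule', hr, i, by omega, hi, hnum, hm⟩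
        · rintro ⟨num, rule', hr, i, hni, hi, hnum, ⟨m, hmr, hmd⟩⟩
          refine ⟨num, rule', hr, i, ?_, hi, hnum, m, hmr, hmd⟩
          rcases Nat.eq_or_lt_of_le hni with rfl | h
          · exfalso
            rw [hua] at hnum
            rw [← hnum, hg] at hr
            injection hr with hr
            subst hr
            rw [hdrop] at hmd
            exact hint ((inter_ne_nil_iff _ _).mpr ⟨m, hmd, hmr⟩)
          · omega

theorem A_char (u : List Int) (rd : List (Int × List Int)) :
    check u rd = false ↔ Viol u rd := by
  rw [check, show (0 : Int) = ((0 : ℕ) : Int) by rfl,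
      AGo_char u rd u 0 (by simp)]
  unfold Viol
  constructor
  · rintro ⟨num, rule, hr, i, -, hi, hnum, hm⟩
    exact ⟨num, rule, hr, i, hi, hnum, hm⟩
  · rintro ⟨num, rule, hr, i, hi, hnum, hm⟩
    exact ⟨num, rule, hr, i, Nat.zero_le i, hi, hnum, hm⟩

theorem getD_eq_get?_getD (d : PySem.Dict Int Int) (k v : Int) :
    d.getD k v = (d.get? k).getD v := rfl

theorem getDL_eq_get?_getD (d : PySem.Dict Int (List Int)) (k : Int) (v : List Int) :
    d.getD k v = (d.get? k).getD v := rfl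

theorem get?_setdefault (d : PySem.Dict Int Int) (k v k' : Int) :
    (PySem.Dict.setdefault d k v).get? k' =
      (match d.get? k with
       | some _ => d.get? k'
       | none => (d.insert k v).get? k') := by
  show (if d.contains k = true then d
        else { items := d.items ++ [(k, v)] } : PySem.Dict Int Int).get? k' = _
  rw [PySem.Dict.contains_eq_isSome_get?]
  cases h : d.get? k with
  | some w => simp
  | none =>
    have hc : d.contains k = false := by
      rw [PySem.Dict.contains_eq_isSome_get?, h]; rfl
    have hins : d.insert k v = ({ items := d.items ++ [(k, v)] } : PySem.Dict Int Int) := by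
      show (if d.contains k then _ else _) = _
      rw [hc]
      simp
    simp [hins]

-- the 'first.setdefault(n, i)' loop records the first index of each element
theorem first_fold (t : List Int) :
    ∀ (s : ℕ) (d : PySem.Dict Int Int) (k : Int),
      ((PySem.List.enumerate t (s : Int)).foldl
        (fun d p => PySem.Dict.setdefault d p.2 p.1) d).get? k =
      (match d.get? k with
       | some v => some v
       | none => (PySem.List.index? t k).map (fun j => ((s + j : ℕ) : Int))) := by
  induction t with
  | nil => intro s d k; cases h : d.get? k <;> simp [PySem.List.enumerate_nil, h]
  | cons a r ih =>
    intro s d k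
    rw [PySem.List.enumerate_cons, List.foldl_cons,
        show ((s : Int) + 1) = ((s + 1 : ℕ) : Int) by push_cast; ring, ih]
    dsimp only
    rw [get?_setdefault]
    cases ha : d.get? a with
    | some w =>
      cases hk : d.get? k with
      | some v => simp
      | none =>
        have hak : a ≠ k := by rintro rfl; rw [ha] at hk; cases hk
        rw [PySem.List.index?_cons_of_ne r hak]
        cases hj : PySem.List.index? r k with
        | none => simp
        | some j => simp; omega
    | none =>
      by_cases hka : k = a
      · subst hka
        rw [PySem.Dict.get?_insert_self, ha, PySem.List.index?_cons_self]
        simp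
      · rw [PySem.Dict.get?_insert_of_ne d _ hka]
        cases hk : d.get? k with
        | some v => simp
        | none =>
          rw [PySem.List.index?_cons_of_ne r (Ne.symm hka)]
          cases hj : PySem.List.index? r k with
          | none => simp
          | some j => simp; omega

-- the 'last[n] = i' loop records the last index of each element
theorem last_fold (t : List Int) :
    ∀ (s : ℕ) (d : PySem.Dict Int Int) (k : Int),
      ((PySem.List.enumerate t (s : Int)).foldl
        (fun d p => PySem.Dict.insert d p.2 p.1) d).get? k =
      (match lastIdx? t k with
       | some j => some ((s + j : ℕ) : Int)
       | none => d.get? k) := by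
  induction t with
  | nil => intro s d k; simp [PySem.List.enumerate_nil, lastIdx?]
  | cons a r ih =>
    intro s d k
    rw [PySem.List.enumerate_cons, List.foldl_cons,
        show ((s : Int) + 1) = ((s + 1 : ℕ) : Int) by push_cast; ring, ih]
    dsimp only
    cases h : lastIdx? r k with
    | some j =>
      have hc : lastIdx? (a :: r) k = some (j + 1) := by simp [lastIdx?, h]
      rw [hc]
      dsimp only
      congr 1
      omega
    | none =>
      by_cases hka : k = a
      · subst hka
        have hc : lastIdx? (k :: r) k = some 0 := by simp [lastIdx?, h]
        rw [hc]
        dsimp only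
        rw [PySem.Dict.get?_insert_self]
        simp
      · have hc : lastIdx? (a :: r) k = none := by
          simp only [lastIdx?, h]
          simp [Ne.symm hka]
        rw [hc]
        dsimp only
        rw [PySem.Dict.get?_insert_of_ne d _ hka]

-- the 'for key in rules_dict' loop with its early 'return False'
theorem rulesGo_char (first last : PySem.Dict Int Int) (rd : PySem.Dict Int (List Int)) :
    ∀ keys : List Int,
      (checkRulesGo first last rd keys = false ↔
        ∃ k ∈ keys, ∃ f, first.get? k = some f ∧
          (rd.getD k []).any (fun m => last.getD m (-1) ≥ f) = true) := by
  intro keys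
  induction keys with
  | nil => simp [checkRulesGo]
  | cons key rest ih =>
    unfold checkRulesGo
    cases hf : first.get? key with
    | none =>
      rw [ih]
      constructor
      · rintro ⟨k, hk, hrest⟩; exact ⟨k, List.mem_cons_of_mem _ hk, hrest⟩
      · rintro ⟨k, hk, f, hkf, hany⟩
        rcases List.mem_cons.mp hk with rfl | hk
        · rw [hf] at hkf; cases hkf
        · exact ⟨k, hk, f, hkf, hany⟩
    | some f =>
      show ((if (rd.getD key []).any (fun m => last.getD m (-1) ≥ f) then false
             else checkRulesGo first last rd rest) = false ↔ _)
      by_cases hany : (rd.getD key []).any (fun m => last.getD m (-1) ≥ f) = true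
      · rw [if_pos hany]
        exact ⟨fun _ => ⟨key, List.mem_cons_self, f, hf, hany⟩, fun _ => rfl⟩
      · rw [if_neg hany, ih]
        constructor
        · rintro ⟨k, hk, hrest⟩; exact ⟨k, List.mem_cons_of_mem _ hk, hrest⟩
        · rintro ⟨k, hk, f', hkf, hany'⟩
          rcases List.mem_cons.mp hk with rfl | hk
          · rw [hf] at hkf
            injection hkf with hkf
            subst hkf
            exact absurd hany' hany
          · exact ⟨k, hk, f', hkf, hany'⟩

theorem B_char (u : List Int) (rd : List (Int × List Int)) :
    check_alt u rd = false ↔ Viol u rd := by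
  unfold check_alt
  rw [rulesGo_char]
  constructor
  · rintro ⟨k, hk, f, hkf, hany⟩
    -- k has a rule (it is a key of rd)
    obtain ⟨rule, hrule⟩ : ∃ rule, (PySem.Dict.mk rd).get? k = some rule := by
      cases hg : (PySem.Dict.mk rd).get? k with
      | none => exact absurd ((PySem.Dict.get?_eq_none_iff_not_mem_keys _ _).mp hg) (not_not_intro hk)
      | some rule => exact ⟨rule, rfl⟩
    -- f is the first index of k in u
    rw [firstIdxDict, show (0 : Int) = ((0 : ℕ) : Int) by rfl, first_fold] at hkf
    cases hidx : PySem.List.index? u k with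
    | none => rw [hidx] at hkf; simp [PySem.Dict.get?_empty] at hkf
    | some fn =>
    rw [hidx] at hkf
    simp only [PySem.Dict.get?_empty, Option.map_some, Nat.zero_add] at hkf
    obtain rfl : ((fn : ℕ) : Int) = f := by
      cases hkf; rfl
    obtain ⟨hflen, hfk, -⟩ := PySem.List.getElem_of_index?_eq_some hidx
    -- the violating member m
    obtain ⟨m, hm, hge⟩ := List.any_eq_true.mp hany
    rw [getDL_eq_get?_getD, hrule] at hm
    rw [getD_eq_get?_getD, lastIdxDict, show (0 : Int) = ((0 : ℕ) : Int) by rfl, last_fold,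
        PySem.Dict.get?_empty] at hge
    have hmem : m ∈ u.drop fn := by
      rw [mem_drop_iff_lastIdx]
      cases hl : lastIdx? u m with
      | none => rw [hl] at hge; simp at hge; omega
      | some l =>
        rw [hl] at hge
        simp only [Option.getD_some, ge_iff_le, Nat.zero_add, decide_eq_true_iff] at hge
        exact ⟨l, rfl, by exact_mod_cast hge⟩
    exact ⟨k, rule, hrule, fn, hflen, hfk, m, hm, hmem⟩
  · rintro ⟨num, rule, hrule, i, hi, hnum, m, hmr, hmd⟩
    -- num is a key of rd
    have hkmem : num ∈ (PySem.Dict.mk rd).keys :=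
      PySem.Dict.mem_keys_of_mem_items _ (PySem.Dict.mem_items_of_get?_eq_some _ hrule)
    -- first index of num exists and is ≤ i
    obtain ⟨fn, hidx⟩ : ∃ fn, PySem.List.index? u num = some fn := by
      have : num ∈ u := hnum ▸ List.getElem_mem hi
      exact Option.isSome_iff_exists.mp (by rwa [PySem.List.index?_isSome_iff])
    obtain ⟨hflen, hfk, hmin⟩ := PySem.List.getElem_of_index?_eq_some hidx
    have hfi : fn ≤ i := by
      by_contra hlt
      exact hmin i (by omega) hnum
    have hmdf : m ∈ u.drop fn := by
      have : u.drop i = (u.drop fn).drop (i - fn) := by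
        rw [List.drop_drop]
        congr 1
        omega
      rw [this] at hmd
      exact List.drop_subset _ _ hmd
    refine ⟨num, hkmem, ((fn : ℕ) : Int), ?_, ?_⟩
    · rw [firstIdxDict, show (0 : Int) = ((0 : ℕ) : Int) by rfl, first_fold,
          PySem.Dict.get?_empty, hidx]
      simp
    · rw [List.any_eq_true]
      refine ⟨m, by rw [getDL_eq_get?_getD, hrule]; exact hmr, ?_⟩
      rw [getD_eq_get?_getD, lastIdxDict, show (0 : Int) = ((0 : ℕ) : Int) by rfl, last_fold,
          PySem.Dict.get?_empty]
      obtain ⟨l, hl, hfl⟩ := (mem_drop_iff_lastIdx u m fn).mp hmdf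
      rw [hl]
      simp only [Option.getD_some, ge_iff_le, decide_eq_true_iff]
      push_cast
      omega

-- ===== VERDICT (by name: the statement is the Claim_ definition above) =====
theorem check_spec : Claim_equal_check := by
  intro u rd _
  unfold Spec_check
  have hA := A_char u rd
  have hB := B_char u rd
  cases ha : check u rd <;> cases hb : check_alt u rd <;> simp_all
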